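-- pv_equiv track=rewrite | github.com/ishwaribhoyar/AI-based-analysis-system-for-aicte-and-ugc-approval-processes | backend/utils/parse_numeric.py | find_canonical_field
-- ===== SOURCE A (Python) =====
-- FIELD_ALIASES = {
--     "total_faculty": ["faculty_count", "teaching_staff", "no_of_faculty", "faculty_strength"],
--     "total_students": ["student_count", "total_enrollment", "enrolled_students", "student_strength"],
--     "ug_enrollment": ["ug_students", "undergraduate_enrollment", "ug_intake"],
--     "pg_enrollment": ["pg_students", "postgraduate_enrollment", "pg_intake"],
--     "placed_students": ["students_placed", "placements", "placed_count"],
--     "eligible_students": ["students_eligible", "eligible_for_placement"],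
--     "placement_rate": ["placement_percentage", "placement_ratio"],
--     "highest_package": ["max_package", "highest_salary", "max_salary_lpa"],
--     "average_package": ["avg_package", "average_salary", "mean_salary_lpa"],
--     "built_up_area": ["total_built_up_area", "building_area", "campus_area"],
--     "classrooms": ["classroom_count", "number_of_classrooms"],
--     "library_area": ["library_size", "library_space"],
--     "lab_area": ["laboratory_area", "lab_space", "total_lab_area"],
-- }
--
-- def find_canonical_field(data: dict, canonical_name: str):
--     """Find a field value using canonical name and aliases."""
--     if canonical_name in data and data[canonical_name] is not None:
--         return data[canonical_name]
--
--     aliases = FIELD_ALIASES.get(canonical_name, [])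
--     for alias in aliases:
--         if alias in data and data[alias] is not None:
--             return data[alias]
--         if f"{alias}_num" in data and data[f"{alias}_num"] is not None:
--             return data[f"{alias}_num"]
--
--     return None
-- ===== SOURCE B (Python) =====
-- FIELD_ALIASES = {
--     "total_faculty": ["faculty_count", "teaching_staff", "no_of_faculty", "faculty_strength"],
--     "total_students": ["student_count", "total_enrollment", "enrolled_students", "student_strength"],
--     "ug_enrollment": ["ug_students", "undergraduate_enrollment", "ug_intake"],
--     "pg_enrollment": ["pg_students", "postgraduate_enrollment", "pg_intake"],
--     "placed_students": ["students_placed", "placements", "placed_count"],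
--     "eligible_students": ["students_eligible", "eligible_for_placement"],
--     "placement_rate": ["placement_percentage", "placement_ratio"],
--     "highest_package": ["max_package", "highest_salary", "max_salary_lpa"],
--     "average_package": ["avg_package", "average_salary", "mean_salary_lpa"],
--     "built_up_area": ["total_built_up_area", "building_area", "campus_area"],
--     "classrooms": ["classroom_count", "number_of_classrooms"],
--     "library_area": ["library_size", "library_space"],
--     "lab_area": ["laboratory_area", "lab_space", "total_lab_area"],
-- }
--
-- def find_canonical_field(data: dict, canonical_name: str):
--     """Find a field value using canonical name and aliases.
--
--     Single pass over the data: rank every candidate key once, then keep the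
--     entry whose key has the lowest rank."""
--     candidates = [canonical_name]
--     for alias in FIELD_ALIASES.get(canonical_name, []):
--         candidates.append(alias)
--         candidates.append(alias + "_num")
--     rank = {}
--     for i, key in enumerate(candidates):
--         if key not in rank:
--             rank[key] = i
--     best = None
--     best_rank = None
--     for key, value in data.items():
--         if value is None:
--             continue
--         r = rank.get(key)
--         if r is not None and (best_rank is None or r < best_rank):
--             best, best_rank = value, r
--     return best
-- ===== Notes on version B (the rewrite author's own statement) =====
-- stated objective: alternative
-- what changed: A probes the dict candidate by candidate (canonical, then alias / alias_num per alias); B instead precomputes a rank for every candidate key and makes one uniform pass over the data items, keeping the value whose key has the lowest rank.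
import Mathlib
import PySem

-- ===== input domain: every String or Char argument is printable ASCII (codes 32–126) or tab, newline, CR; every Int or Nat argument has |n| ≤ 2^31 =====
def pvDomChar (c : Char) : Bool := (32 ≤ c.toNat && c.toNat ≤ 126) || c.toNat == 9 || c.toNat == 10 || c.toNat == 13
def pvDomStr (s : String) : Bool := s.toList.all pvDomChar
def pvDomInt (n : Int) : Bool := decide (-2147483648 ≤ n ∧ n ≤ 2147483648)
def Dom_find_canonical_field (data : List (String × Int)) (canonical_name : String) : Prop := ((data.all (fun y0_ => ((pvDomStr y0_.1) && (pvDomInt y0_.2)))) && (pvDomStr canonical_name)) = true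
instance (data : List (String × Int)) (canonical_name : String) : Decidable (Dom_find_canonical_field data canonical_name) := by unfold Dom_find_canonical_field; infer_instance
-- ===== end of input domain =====

-- B replaces A's candidate-by-candidate probing of the dict with a single pass over the data
-- that keeps the entry whose key has the lowest precomputed candidate rank (objective: alternative).
-- Values are Int here, so Python's `is not None` checks are vacuously true inside the ports.

-- ===== PORT A =====
-- the module-level FIELD_ALIASES dict (str -> list[str]); shared module context used by both programs
def pvFieldAliases : List (String × List String) :=
  [("total_faculty", ["faculty_count", "teaching_staff", "no_of_faculty", "faculty_strength"]),
   ("total_students", ["student_count", "total_enrollment", "enrolled_students", "student_strength"]),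
   ("ug_enrollment", ["ug_students", "undergraduate_enrollment", "ug_intake"]),
   ("pg_enrollment", ["pg_students", "postgraduate_enrollment", "pg_intake"]),
   ("placed_students", ["students_placed", "placements", "placed_count"]),
   ("eligible_students", ["students_eligible", "eligible_for_placement"]),
   ("placement_rate", ["placement_percentage", "placement_ratio"]),
   ("highest_package", ["max_package", "highest_salary", "max_salary_lpa"]),
   ("average_package", ["avg_package", "average_salary", "mean_salary_lpa"]),
   ("built_up_area", ["total_built_up_area", "building_area", "campus_area"]),
   ("classrooms", ["classroom_count", "number_of_classrooms"]),
   ("library_area", ["library_size", "library_space"]),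
   ("lab_area", ["laboratory_area", "lab_space", "total_lab_area"])]

-- A's `for alias in aliases:` loop; `alias in data and data[alias] is not None` is a
-- first-match lookup (dict → assoc-list convention), and values are never None
def pvAliasLoop (data : List (String × Int)) : List String → Option Int
  | [] => none
  | a :: rest =>
    match data.lookup a with
    | some v => some v
    | none =>
      match data.lookup (a ++ "_num") with
      | some v => some v
      | none => pvAliasLoop data rest

def find_canonical_field (data : List (String × Int)) (canonical_name : String) : Option Int :=
  match data.lookup canonical_name with
  | some v => some v
  | none => pvAliasLoop data ((pvFieldAliases.lookup canonical_name).getD [])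

-- ===== PORT B =====
-- the `r is not None and (best_rank is None or r < best_rank)` update of Source B's data loop
def pvStep (rank : PySem.Dict String Int) (acc : Option Int × Option Int)
    (kv : String × Int) : Option Int × Option Int :=
  match rank.get? kv.1 with
  | none => acc
  | some r =>
    match acc.2 with
    | none => (some kv.2, some r)
    | some br => if r < br then (some kv.2, some r) else acc

def find_canonical_field_alt (data : List (String × Int)) (canonical_name : String) : Option Int :=
  let candidates :=
    ((pvFieldAliases.lookup canonical_name).getD []).foldl
      (fun acc a => (acc ++ [a]) ++ [a ++ "_num"]) [canonical_name]
  let rank :=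
    (PySem.List.enumerate candidates).foldl
      (fun d p => if d.contains p.2 then d else d.insert p.2 p.1) PySem.Dict.empty
  (data.foldl (pvStep rank) (none, none)).1

-- ===== PRECONDITION & SPEC =====
def Spec_find_canonical_field (data : List (String × Int)) (canonical_name : String) (out : Option Int) : Prop := out = find_canonical_field_alt data canonical_name
instance (data : List (String × Int)) (canonical_name : String) (out : Option Int) : Decidable (Spec_find_canonical_field data canonical_name out) := by unfold Spec_find_canonical_field; infer_instance

-- ===== CLAIM (what is proved, stated in full; the proofs are below) =====
def Claim_equal_find_canonical_field : Prop := ∀ (data : List (String × Int)) (canonical_name : String), Dom_find_canonical_field data canonical_name → Spec_find_canonical_field data canonical_name (find_canonical_field data canonical_name)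

-- ===== LEMMAS AND PROOFS =====

-- the best (value, rank) pair B's data loop has selected, as a head-first recursion
def pvMin (rank : PySem.Dict String Int) : List (String × Int) → Option (Int × Int)
  | [] => none
  | kv :: rest =>
    match rank.get? kv.1 with
    | none => pvMin rank rest
    | some r =>
      match pvMin rank rest with
      | none => some (kv.2, r)
      | some (v', r') => if r' < r then some (v', r') else some (kv.2, r)

def pvMerge (acc : Option Int × Option Int) : Option (Int × Int) → Option Int × Option Int
  | none => acc
  | some (v, r) =>
    match acc.2 with
    | none => (some v, some r)
    | some br => if r < br then (some v, some r) else acc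

theorem pvFoldl_eq_merge_min (rank : PySem.Dict String Int) (data : List (String × Int))
    (acc : Option Int × Option Int) :
    data.foldl (pvStep rank) acc = pvMerge acc (pvMin rank data) := by
  induction data generalizing acc with
  | nil => rfl
  | cons kv rest ih =>
    simp only [List.foldl_cons, ih, pvMin]
    cases hget : rank.get? kv.1 with
    | none => simp [pvStep, hget]
    | some r =>
      cases hmin : pvMin rank rest with
      | none => simp [pvStep, pvMerge, hget]
      | some vr =>
        obtain ⟨v', r'⟩ := vr
        obtain ⟨b, bp⟩ := acc
        cases bp with
        | none =>
          simp only [pvStep, hget, pvMerge]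
          split_ifs <;> rfl
        | some br =>
          simp only [pvStep, hget]
          split_ifs <;> simp only [pvMerge] <;> split_ifs <;>
            first | rfl | (exfalso; omega)

theorem pvMin_rank_mem (rank : PySem.Dict String Int) (data : List (String × Int))
    (v r : Int) (h : pvMin rank data = some (v, r)) : ∃ k, rank.get? k = some r := by
  induction data generalizing v r with
  | nil => simp [pvMin] at h
  | cons kv rest ih =>
    simp only [pvMin] at h
    cases hget : rank.get? kv.1 with
    | none => rw [hget] at h; exact ih v r h
    | some r0 =>
      rw [hget] at h
      cases hmin : pvMin rank rest with
      | none =>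
        rw [hmin] at h
        simp only [Option.some.injEq, Prod.mk.injEq] at h
        exact ⟨kv.1, by rw [hget, h.2]⟩
      | some vr =>
        obtain ⟨v', r'⟩ := vr
        rw [hmin] at h
        dsimp only at h
        split_ifs at h <;> simp only [Option.some.injEq, Prod.mk.injEq] at h
        · obtain ⟨hv, hr⟩ := h
          subst hv; subst hr
          exact ih _ _ hmin
        · exact ⟨kv.1, by rw [hget, h.2]⟩

theorem pvGetMk_mem_snd (ps : List (String × Int)) (k : String) (r : Int)
    (h : (PySem.Dict.mk ps).get? k = some r) : r ∈ ps.map (·.2) := by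
  induction ps with
  | nil => simp [PySem.Dict.get?] at h
  | cons p rest ih =>
    rw [show (p :: rest : List (String × Int)) = ((p.1, p.2) :: rest) from rfl,
        PySem.Dict.get?_mk_cons] at h
    by_cases hk : (p.1 == k : Bool)
    · rw [if_pos hk] at h
      simp only [Option.some.injEq] at h
      simp [← h]
    · rw [if_neg hk] at h
      simp [ih h]

-- peeling the strictly smallest rank: entries keyed k dominate everything else
theorem pvMin_cons_rank (k : String) (rk : Int) (rest : List (String × Int))
    (hmin : ∀ r' ∈ rest.map (·.2), rk < r') (data : List (String × Int)) :
    pvMin (PySem.Dict.mk ((k, rk) :: rest)) data =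
      (match data.lookup k with
       | some v => some (v, rk)
       | none => pvMin (PySem.Dict.mk rest) data) := by
  induction data with
  | nil => rfl
  | cons kv dr ih =>
    obtain ⟨k0, v0⟩ := kv
    by_cases hk : (k == k0 : Bool)
    · have hkeq : k0 = k := (eq_of_beq hk).symm
      subst hkeq
      simp only [pvMin, PySem.Dict.get?_mk_cons, if_pos hk, List.lookup_cons_self]
      cases hmin2 : pvMin (PySem.Dict.mk ((k0, rk) :: rest)) dr with
      | none => rfl
      | some vr =>
        obtain ⟨v', r'⟩ := vr
        have hnotlt : ¬ r' < rk := by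
          obtain ⟨k', hk'⟩ := pvMin_rank_mem _ _ _ _ hmin2
          have := pvGetMk_mem_snd _ _ _ hk'
          simp only [List.map_cons, List.mem_cons] at this
          rcases this with h1 | h2
          · omega
          · have := hmin r' h2; omega
        simp [hnotlt]
    · have hne : k ≠ k0 := by simpa using hk
      have hk0 : (k0 == k : Bool) = false := beq_eq_false_iff_ne.mpr (Ne.symm hne)
      have hlk : List.lookup k ((k0, v0) :: dr) = List.lookup k dr := by
        simp [List.lookup_cons, hk]
      rw [hlk]
      cases hrest : (PySem.Dict.mk rest).get? k0 with
      | none =>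
        have h1 : pvMin (PySem.Dict.mk ((k, rk) :: rest)) ((k0, v0) :: dr)
            = pvMin (PySem.Dict.mk ((k, rk) :: rest)) dr := by
          simp only [pvMin, PySem.Dict.get?_mk_cons]
          rw [if_neg (by simpa using hk), hrest]
        have h2 : pvMin (PySem.Dict.mk rest) ((k0, v0) :: dr)
            = pvMin (PySem.Dict.mk rest) dr := by
          simp only [pvMin]; rw [hrest]
        rw [h1, h2, ih]
      | some r0 =>
        have hrklt : rk < r0 := hmin r0 (pvGetMk_mem_snd _ _ _ hrest)
        have hget1 : (PySem.Dict.mk ((k, rk) :: rest)).get? k0 = some r0 := by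
          rw [PySem.Dict.get?_mk_cons, if_neg (by simpa using hk), hrest]
        cases hlook : List.lookup k dr with
        | some v =>
          have hih : pvMin (PySem.Dict.mk ((k, rk) :: rest)) dr = some (v, rk) := by
            rw [ih, hlook]
          simp only [pvMin, hget1, hih]
          simp [hrklt]
        | none =>
          have hih : pvMin (PySem.Dict.mk ((k, rk) :: rest)) dr
              = pvMin (PySem.Dict.mk rest) dr := by
            rw [ih, hlook]
          simp only [pvMin, hget1, hrest, hih]

theorem pvMin_empty (data : List (String × Int)) :
    pvMin (PySem.Dict.mk []) data = none := by
  induction data with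
  | nil => rfl
  | cons kv dr ih =>
    simp only [pvMin]
    have : (PySem.Dict.mk ([] : List (String × Int))).get? kv.1 = none := rfl
    rw [this, ih]

-- main characterisation: the min-rank scan is the first-candidate search over the rank keys
theorem pvMin_eq_findSome (ps : List (String × Int))
    (hpw : (ps.map (·.2)).Pairwise (· < ·)) (data : List (String × Int)) :
    (pvMin (PySem.Dict.mk ps) data).map (·.1)
      = (ps.map (·.1)).findSome? (fun k => data.lookup k) := by
  induction ps with
  | nil => simp [pvMin_empty]
  | cons p rest ih =>
    obtain ⟨k, rk⟩ := p
    simp only [List.map_cons, List.pairwise_cons] at hpw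
    rw [show ((k, rk) :: rest : List (String × Int)).map (·.1) = k :: rest.map (·.1) by simp]
    rw [pvMin_cons_rank k rk rest hpw.1 data]
    cases hlook : data.lookup k with
    | some v => simp [hlook]
    | none => simp [hlook, ih hpw.2]

-- the findSome? search ignores a candidate that already occurred earlier
theorem pvFindSome_dup (f : String → Option Int) (A B : List String) (c : String)
    (hc : c ∈ A) : (A ++ c :: B).findSome? f = (A ++ B).findSome? f := by
  rw [List.findSome?_append, List.findSome?_append, List.findSome?_cons]
  cases hA : A.findSome? f with
  | some v => simp
  | none =>
    have hfc : f c = none := by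
      rw [List.findSome?_eq_none_iff] at hA
      exact hA c hc
    simp [hfc]

-- invariant of Source B's rank-building loop: ranks strictly increase along the dict,
-- and a findSome? search over (seen keys ++ remaining candidates) is unchanged by it
theorem pvRankFold_inv (cs : List String) (s : Int) (d : PySem.Dict String Int)
    (hpw : (d.items.map (·.2)).Pairwise (· < ·)) (hbd : ∀ r ∈ d.items.map (·.2), r < s) :
    (((PySem.List.enumerate cs s).foldl
        (fun d p => if d.contains p.2 then d else d.insert p.2 p.1) d).items.map (·.2)).Pairwise (· < ·)
    ∧ ∀ f : String → Option Int,
        (((PySem.List.enumerate cs s).foldl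
            (fun d p => if d.contains p.2 then d else d.insert p.2 p.1) d).items.map (·.1)).findSome? f
          = (d.items.map (·.1) ++ cs).findSome? f := by
  induction cs generalizing s d with
  | nil => simp [PySem.List.enumerate, hpw]
  | cons c cs ih =>
    rw [PySem.List.enumerate_cons, List.foldl_cons]
    by_cases hc : (d.contains c : Bool)
    · rw [if_pos hc]
      obtain ⟨ih1, ih2⟩ := ih (s + 1) d hpw (fun r hr => by have := hbd r hr; omega)
      refine ⟨ih1, fun f => ?_⟩
      rw [ih2 f]
      exact (pvFindSome_dup f (d.items.map (·.1)) cs c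
        (by simpa [PySem.Dict.keys] using (PySem.Dict.contains_iff_mem_keys d c).mp hc)).symm
    · rw [if_neg hc]
      have hcf : d.contains c = false := by simpa using hc
      have hitems : (d.insert c s).items = d.items ++ [(c, s)] :=
        PySem.Dict.items_insert_of_not_contains d s hcf
      have hpw' : ((d.insert c s).items.map (·.2)).Pairwise (· < ·) := by
        rw [hitems]
        simp only [List.map_append, List.map_cons, List.map_nil]
        rw [List.pairwise_append]
        exact ⟨hpw, by simp, by simpa using hbd⟩
      have hbd' : ∀ r ∈ (d.insert c s).items.map (·.2), r < s + 1 := by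
        rw [hitems]
        intro r hr
        simp only [List.map_append, List.mem_append, List.map_cons, List.mem_cons] at hr
        rcases hr with h | h
        · have := hbd r h; omega
        · simp at h; omega
      obtain ⟨ih1, ih2⟩ := ih (s + 1) (d.insert c s) hpw' hbd'
      refine ⟨ih1, fun f => ?_⟩
      rw [ih2 f, hitems]
      simp

-- A's search revisited: it is findSome? over the candidate list B builds
theorem pvAliasLoop_eq_findSome (data : List (String × Int)) (l : List String) :
    pvAliasLoop data l
      = (l.flatMap (fun a => [a, a ++ "_num"])).findSome? (fun k => data.lookup k) := by
  induction l with
  | nil => rfl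
  | cons a rest ih =>
    simp only [pvAliasLoop, List.flatMap_cons, List.cons_append, List.nil_append,
      List.findSome?_cons]
    cases h1 : data.lookup a with
    | some v => rfl
    | none =>
      cases h2 : data.lookup (a ++ "_num") with
      | some v => rfl
      | none => exact ih

-- B's candidate-building loop produces exactly head :: flatMap
theorem pvCandidates_eq (l : List String) (init : List String) :
    l.foldl (fun acc a => (acc ++ [a]) ++ [a ++ "_num"]) init
      = init ++ l.flatMap (fun a => [a, a ++ "_num"]) := by
  induction l generalizing init with
  | nil => simp
  | cons a rest ih => rw [List.foldl_cons, ih]; simp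

-- ===== VERDICT (by name: the statement is the Claim_ definition above) =====
theorem find_canonical_field_spec : Claim_equal_find_canonical_field := by
  intro data canonical_name _
  unfold Spec_find_canonical_field find_canonical_field find_canonical_field_alt
  rw [pvCandidates_eq]
  set cs := canonical_name :: ((pvFieldAliases.lookup canonical_name).getD []).flatMap
      (fun a => [a, a ++ "_num"]) with hcs
  rw [show ([canonical_name] ++ ((pvFieldAliases.lookup canonical_name).getD []).flatMap
      (fun a => [a, a ++ "_num"])) = cs by simp [hcs]]
  set rank := (PySem.List.enumerate cs).foldl
      (fun d p => if d.contains p.2 then d else d.insert p.2 p.1) PySem.Dict.empty with hrank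
  obtain ⟨hpw, hfs⟩ := pvRankFold_inv cs 0 PySem.Dict.empty (by simp [PySem.Dict.empty]) (by simp [PySem.Dict.empty])
  have hb : (data.foldl (pvStep rank) (none, none)).1
      = (rank.items.map (·.1)).findSome? (fun k => data.lookup k) := by
    rw [pvFoldl_eq_merge_min]
    have := pvMin_eq_findSome rank.items hpw data
    rw [show (PySem.Dict.mk rank.items) = rank from rfl] at this
    rw [← this]
    cases h : pvMin rank data with
    | none => rfl
    | some vr => obtain ⟨v, r⟩ := vr; rfl
  rw [hb, hfs]
  rw [show ((PySem.Dict.empty : PySem.Dict String Int).items.map (·.1) ++ cs) = cs from rfl]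
  rw [pvAliasLoop_eq_findSome]
  simp only [hcs, List.findSome?_cons]
  cases h : data.lookup canonical_name <;> rfl
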